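-- pv_equiv track=rewrite | github.com/PiresAllanSilva/bioinfotest | output/assembler.py | define_pairs
-- ===== SOURCE A (Python) =====
-- def define_pairs(seq1, seq2):
--     tuples = []
--     kmer = int(len(seq1))/2
--     kmer2 = int(len(seq2))/2
--     win = len(seq1)-int(kmer)+1
--     for i in range(win):
--         new_sequence = seq1[i:int(kmer)+i]
--         for j in range(len(seq2)):
--             kmer_seq2 = seq2[j:int(kmer2)+j]
--             if kmer_seq2 == new_sequence:
--                 tuples = (seq1, seq2, i, j)
--                 return tuples
-- ===== SOURCE B (Python) =====
-- def define_pairs(seq1, seq2):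
--     k1 = len(seq1) // 2
--     k2 = len(seq2) // 2
--     index = {}
--     for j in range(len(seq2)):
--         w = seq2[j:j + k2]
--         if w not in index:
--             index[w] = j
--     for i in range(len(seq1) - k1 + 1):
--         j = index.get(seq1[i:i + k1])
--         if j is not None:
--             return (seq1, seq2, i, j)
-- ===== Notes on version B (the rewrite author's own statement) =====
-- stated objective: faster
-- what changed: Replaces the nested i,j scan (every seq2 window recompared for every i) by a one-time dict from seq2 window to its smallest j, then a single pass over i with an O(1) lookup.
import Mathlib
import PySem

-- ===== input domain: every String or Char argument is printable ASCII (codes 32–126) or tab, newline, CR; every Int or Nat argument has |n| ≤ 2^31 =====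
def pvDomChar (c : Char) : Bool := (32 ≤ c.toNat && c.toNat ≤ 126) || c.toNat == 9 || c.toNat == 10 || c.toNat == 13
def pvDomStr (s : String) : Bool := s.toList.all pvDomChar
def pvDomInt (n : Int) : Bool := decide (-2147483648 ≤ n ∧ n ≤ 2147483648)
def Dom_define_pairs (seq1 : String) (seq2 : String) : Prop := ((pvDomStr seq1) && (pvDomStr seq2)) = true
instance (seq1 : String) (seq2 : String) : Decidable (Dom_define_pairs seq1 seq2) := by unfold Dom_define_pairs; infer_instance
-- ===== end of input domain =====

-- B indexes seq2's half-length windows in a dict (window → smallest j) once, then scans i a single time; faster in a timing run (asymptotic: the inner j-scan disappears).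

-- ===== PORT A =====
-- 'int(len(seq))/2' then 'int(kmer)': exact floats (len ≤ 2^31, halves exact), int() truncates a
-- nonnegative value, so int(kmer) = len // 2 = PySem.Int.floordiv len 2.
-- inner j-loop: 'for j in range(len(seq2)): if seq2[j:int(kmer2)+j] == new_sequence: return (seq1,seq2,i,j)'
def pvAInner (seq1 seq2 : String) (k2 : Int) (newSeq : String) (i : Int) :
    List Int → Option (String × String × Int × Int)
  | [] => none
  | j :: js =>
      let kmerSeq2 := PySem.Str.slice seq2 (some j) (some (k2 + j))
      if kmerSeq2 = newSeq then some (seq1, seq2, i, j)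
      else pvAInner seq1 seq2 k2 newSeq i js

-- outer i-loop over range(win)
def pvAOuter (seq1 seq2 : String) (k1 k2 : Int) :
    List Int → Option (String × String × Int × Int)
  | [] => none
  | i :: is =>
      let newSeq := PySem.Str.slice seq1 (some i) (some (k1 + i))
      match pvAInner seq1 seq2 k2 newSeq i (PySem.List.pyRange 0 (PySem.Str.len seq2) 1) with
      | some r => some r
      | none => pvAOuter seq1 seq2 k1 k2 is

def define_pairs (seq1 : String) (seq2 : String) : Option (String × String × Int × Int) :=
  let kmer : Int := PySem.Int.floordiv (PySem.Str.len seq1) 2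
  let kmer2 : Int := PySem.Int.floordiv (PySem.Str.len seq2) 2
  let win : Int := PySem.Str.len seq1 - kmer + 1
  pvAOuter seq1 seq2 kmer kmer2 (PySem.List.pyRange 0 win 1)

-- ===== PORT B =====
-- 'for j in range(len(seq2)): w = seq2[j:j+k2]; if w not in index: index[w] = j'
def pvBBuild (seq2 : String) (k2 : Int) :
    List Int → PySem.Dict String Int → PySem.Dict String Int
  | [], d => d
  | j :: js, d =>
      let w := PySem.Str.slice seq2 (some j) (some (j + k2))
      pvBBuild seq2 k2 js (if d.contains w then d else d.insert w j)

-- 'for i in range(len(seq1)-k1+1): j = index.get(seq1[i:i+k1]); if j is not None: return …'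
def pvBScan (seq1 seq2 : String) (k1 : Int) (d : PySem.Dict String Int) :
    List Int → Option (String × String × Int × Int)
  | [] => none
  | i :: is =>
      match d.get? (PySem.Str.slice seq1 (some i) (some (i + k1))) with
      | some j => some (seq1, seq2, i, j)
      | none => pvBScan seq1 seq2 k1 d is

def define_pairs_alt (seq1 : String) (seq2 : String) : Option (String × String × Int × Int) :=
  let k1 : Int := PySem.Int.floordiv (PySem.Str.len seq1) 2
  let k2 : Int := PySem.Int.floordiv (PySem.Str.len seq2) 2
  let d := pvBBuild seq2 k2 (PySem.List.pyRange 0 (PySem.Str.len seq2) 1) PySem.Dict.empty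
  pvBScan seq1 seq2 k1 d (PySem.List.pyRange 0 (PySem.Str.len seq1 - k1 + 1) 1)

-- ===== PRECONDITION & SPEC =====
def Spec_define_pairs (seq1 : String) (seq2 : String) (out : Option (String × String × Int × Int)) : Prop := out = define_pairs_alt seq1 seq2
instance (seq1 : String) (seq2 : String) (out : Option (String × String × Int × Int)) : Decidable (Spec_define_pairs seq1 seq2 out) := by unfold Spec_define_pairs; infer_instance

-- ===== CLAIM (what is proved, stated in full; the proofs are below) =====
def Claim_equal_define_pairs : Prop := ∀ (seq1 : String) (seq2 : String), Dom_define_pairs seq1 seq2 → Spec_define_pairs seq1 seq2 (define_pairs seq1 seq2)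

-- ===== LEMMAS AND PROOFS =====

-- A's inner loop is the first j in the list whose seq2 window equals the target.
theorem pvAInner_eq_find (seq1 seq2 : String) (k2 : Int) (t : String) (i : Int) (js : List Int) :
    pvAInner seq1 seq2 k2 t i js =
      (js.find? (fun j => decide (PySem.Str.slice seq2 (some j) (some (k2 + j)) = t))).map
        (fun j => (seq1, seq2, i, j)) := by
  induction js with
  | nil => rfl
  | cons j js ih =>
      simp only [pvAInner, List.find?]
      by_cases h : PySem.Str.slice seq2 (some j) (some (k2 + j)) = t
      · simp [h]
      · simp [h, ih]

-- B's dict lookup after the build loop is the same first match (earlier entries win: the loop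
-- only inserts keys not yet present).
theorem pvBBuild_get (seq2 : String) (k2 : Int) (w : String) (js : List Int)
    (d : PySem.Dict String Int) :
    (pvBBuild seq2 k2 js d).get? w =
      (d.get? w).or
        ((js.find? (fun j => decide (PySem.Str.slice seq2 (some j) (some (k2 + j)) = w)))) := by
  induction js generalizing d with
  | nil => simp [pvBBuild]
  | cons j js ih =>
      simp only [pvBBuild, List.find?]
      have hcomm : (j + k2) = (k2 + j) := by ring
      by_cases hw : PySem.Str.slice seq2 (some j) (some (k2 + j)) = w
      · simp only [hw, decide_true]
        by_cases hc : d.contains w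
        · rw [hcomm, hw, if_pos hc, ih]
          have : (d.get? w).isSome := by
            rw [← PySem.Dict.contains_eq_isSome_get?]; exact hc
          cases hg : d.get? w with
          | none => simp [hg] at this
          | some v => simp
        · rw [hcomm, hw, if_neg hc, ih]
          have hgn : d.get? w = none := by
            have := PySem.Dict.contains_eq_isSome_get? d w
            cases hg : d.get? w with
            | none => rfl
            | some v => rw [hg] at this; simp at this; exact absurd this hc
          rw [PySem.Dict.get?_insert, if_pos rfl, hgn]
          simp
      · simp only [hw, decide_false]
        by_cases hc : d.contains (PySem.Str.slice seq2 (some j) (some (j + k2)))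
        · rw [if_pos hc, ih]
        · rw [if_neg hc, ih, PySem.Dict.get?_insert]
          rw [if_neg]
          intro he; exact hw (by rw [he, hcomm])

-- the two outer loops agree pointwise over any list of i's
theorem pvOuter_eq (seq1 seq2 : String) (k1 k2 : Int) (is : List Int) :
    pvAOuter seq1 seq2 k1 k2 is =
      pvBScan seq1 seq2 k1
        (pvBBuild seq2 k2 (PySem.List.pyRange 0 (PySem.Str.len seq2) 1) PySem.Dict.empty) is := by
  induction is with
  | nil => rfl
  | cons i is ih =>
      simp only [pvAOuter, pvBScan]
      rw [pvBBuild_get, pvAInner_eq_find]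
      have harg : PySem.Str.slice seq1 (some i) (some (i + k1)) =
          PySem.Str.slice seq1 (some i) (some (k1 + i)) := by ring_nf
      rw [harg]
      simp only [PySem.Dict.get?_empty, Option.none_or]
      cases List.find? (fun j => decide (PySem.Str.slice seq2 (some j) (some (k2 + j)) =
          PySem.Str.slice seq1 (some i) (some (k1 + i))))
          (PySem.List.pyRange 0 (PySem.Str.len seq2) 1) with
      | none => simpa using ih
      | some j => rfl

-- ===== VERDICT (by name: the statement is the Claim_ definition above) =====
theorem define_pairs_spec : Claim_equal_define_pairs := by
  intro seq1 seq2 _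
  show define_pairs seq1 seq2 = define_pairs_alt seq1 seq2
  unfold define_pairs define_pairs_alt
  exact pvOuter_eq seq1 seq2 _ _ _
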